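-- pv_equiv track=rewrite | github.com/sujeet-kr/MLND | data_preparation.py | sort_question_answers_based_on_number_of_words
-- ===== SOURCE A (Python) =====
-- min_line_length = 2 # Minimum number of words required to be in a Question/Answer for consideration in training
--
-- def sort_question_answers_based_on_number_of_words(questions, answers, max_line_length):
--     # Sort questions and answers by the length of questions.
--     # This will reduce the amount of padding during training
--     # Which should speed up training and help to reduce the loss
--
--     sorted_questions = []
--     sorted_answers = []
--
--     for length in range(min_line_length, max_line_length):
--         for i, ques in enumerate(questions):
--             ques_tmp = ques.split(" ")
--             if len(ques_tmp) == length: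
--                 sorted_questions.append(questions[i])
--                 sorted_answers.append(answers[i])
--
--     return sorted_questions, sorted_answers
-- ===== SOURCE B (Python) =====
-- def sort_question_answers_based_on_number_of_words(questions, answers, max_line_length):
--     # Keep only pairs whose question word count is in [2, max_line_length),
--     # then stable-sort once by that word count (computed once per question).
--     pairs = [(q, a) for q, a in zip(questions, answers)
--              if 2 <= len(q.split(" ")) < max_line_length]
--     pairs = sorted(pairs, key=lambda p: len(p[0].split(" ")))
--     return [q for q, _ in pairs], [a for _, a in pairs]
-- ===== Notes on version B (the rewrite author's own statement) =====
-- stated objective: faster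
-- what changed: A rescans all questions once per candidate length (range(2, max_line_length) passes, re-splitting every question each time); B filters the zipped pairs once, computing each question's word count a single time, and does one stable sort by that count.
import Mathlib
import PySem

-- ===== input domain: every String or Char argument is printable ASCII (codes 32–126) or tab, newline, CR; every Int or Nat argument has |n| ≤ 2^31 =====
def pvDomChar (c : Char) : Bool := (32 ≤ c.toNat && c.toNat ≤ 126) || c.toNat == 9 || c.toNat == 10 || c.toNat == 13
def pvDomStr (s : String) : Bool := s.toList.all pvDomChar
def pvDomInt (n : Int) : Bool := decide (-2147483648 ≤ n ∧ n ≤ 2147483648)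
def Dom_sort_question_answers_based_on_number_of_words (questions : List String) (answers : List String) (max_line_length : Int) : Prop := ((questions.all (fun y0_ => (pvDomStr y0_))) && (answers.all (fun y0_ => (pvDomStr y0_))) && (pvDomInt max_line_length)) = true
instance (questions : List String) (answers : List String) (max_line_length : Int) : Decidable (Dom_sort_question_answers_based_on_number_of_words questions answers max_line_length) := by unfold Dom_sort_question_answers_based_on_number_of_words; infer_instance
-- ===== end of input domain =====

-- B replaces A's pass-per-candidate-length rescan (range(2, max_line_length) passes over all
-- questions, re-splitting each question every pass) by one filter over the zipped pairs plus one
-- stable sort keyed by the word count, computed once per question (objective: faster).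

-- ===== PORT A =====
-- min_line_length = 2 (module constant, inlined at its only use, as in the source)
def sort_question_answers_based_on_number_of_words (questions : List String) (answers : List String) (max_line_length : Int) : List String × List String :=
  (PySem.List.pyRange 2 max_line_length).foldl
    (fun acc length =>
      (PySem.List.enumerate questions).foldl
        (fun acc2 iq =>
          if ((((PySem.Str.split? iq.2 " ").getD []).length : Int) = length) then
            (acc2.1 ++ [PySem.List.pyGetD questions iq.1 ""],
             acc2.2 ++ [PySem.List.pyGetD answers iq.1 ""])
          else acc2)
        acc)
    ([], [])

-- ===== PORT B =====
def sort_question_answers_based_on_number_of_words_alt (questions : List String) (answers : List String) (max_line_length : Int) : List String × List String :=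
  let pairs := (questions.zip answers).filter
    (fun p => decide (2 ≤ ((((PySem.Str.split? p.1 " ").getD []).length : Int)) ∧ ((((PySem.Str.split? p.1 " ").getD []).length : Int)) < max_line_length))
  let pairs2 := PySem.List.sorted pairs (fun p => ((((PySem.Str.split? p.1 " ").getD []).length : Int)))
  (pairs2.map Prod.fst, pairs2.map Prod.snd)

-- ===== PRECONDITION & SPEC =====
-- word count of a question, Python's len(q.split(" ")) (the separator " " is non-empty, so split? never fails)
def pvWcI (q : String) : Int := (((PySem.Str.split? q " ").getD []).length : Int)

-- A raises IndexError on answers[i] exactly when some question whose word count falls in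
-- [2, max_line_length) sits at an index with no matching answer; Pre_ excludes exactly those inputs.
def Pre_sort_question_answers_based_on_number_of_words (questions : List String) (answers : List String) (max_line_length : Int) : Prop :=
  ∀ k, k < questions.length →
    (2 ≤ pvWcI (questions.getD k "") ∧ pvWcI (questions.getD k "") < max_line_length) →
    k < answers.length
instance (questions : List String) (answers : List String) (max_line_length : Int) : Decidable (Pre_sort_question_answers_based_on_number_of_words questions answers max_line_length) := by unfold Pre_sort_question_answers_based_on_number_of_words; infer_instance

def pvWitness_sort_question_answers_based_on_number_of_words : List String × List String × Int :=
  (["a a", "b b b", "c"], ["x", "y", "z"], 4)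

def Spec_sort_question_answers_based_on_number_of_words (questions : List String) (answers : List String) (max_line_length : Int) (out : List String × List String) : Prop := out = sort_question_answers_based_on_number_of_words_alt questions answers max_line_length
instance (questions : List String) (answers : List String) (max_line_length : Int) (out : List String × List String) : Decidable (Spec_sort_question_answers_based_on_number_of_words questions answers max_line_length out) := by unfold Spec_sort_question_answers_based_on_number_of_words; infer_instance

-- ===== CLAIM (what is proved, stated in full; the proofs are below) =====
def Claim_equal_sort_question_answers_based_on_number_of_words : Prop := ∀ (questions : List String) (answers : List String) (max_line_length : Int), Dom_sort_question_answers_based_on_number_of_words questions answers max_line_length → Pre_sort_question_answers_based_on_number_of_words questions answers max_line_length → Spec_sort_question_answers_based_on_number_of_words questions answers max_line_length (sort_question_answers_based_on_number_of_words questions answers max_line_length)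

-- ===== LEMMAS AND PROOFS =====

-- flatMap congruence on members
theorem pvFlatMap_congr_mem {α β : Type} {l : List α} {f g : α → List β}
    (h : ∀ x ∈ l, f x = g x) : l.flatMap f = l.flatMap g := by
  induction l with
  | nil => rfl
  | cons a t ih =>
    simp only [List.flatMap_cons]
    rw [h a (by simp), ih (fun x hx => h x (by simp [hx]))]

-- range(a, b) is strictly increasing
theorem pvPyRange_pairwise (a b : Int) : (PySem.List.pyRange a b).Pairwise (· < ·) := by
  unfold PySem.List.pyRange
  simp only [one_ne_zero, if_false]
  exact List.Pairwise.map _ (fun x y h => by omega) (List.pairwise_lt_range)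

-- insertBy walks past a prefix it does not insert into
theorem pvInsertBy_skip {α : Type} (pred : α → α → Bool) (x : α) (l1 l2 : List α)
    (h : ∀ y ∈ l1, pred x y = false) :
    PySem.List.insertBy pred x (l1 ++ l2) = l1 ++ PySem.List.insertBy pred x l2 := by
  induction l1 with
  | nil => rfl
  | cons a t ih =>
    have ha : pred x a = false := h a (by simp)
    simp only [List.cons_append, PySem.List.insertBy, ha, Bool.false_eq_true, if_false]
    rw [ih (fun y hy => h y (by simp [hy]))]

-- insertBy puts x in front when everything after is bigger
theorem pvInsertBy_front {α : Type} (pred : α → α → Bool) (x : α) (l2 : List α)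
    (h : ∀ y ∈ l2, pred x y = true) :
    PySem.List.insertBy pred x l2 = x :: l2 := by
  cases l2 with
  | nil => rfl
  | cons a t => simp [PySem.List.insertBy, h a (by simp)]

-- inserting into a concatenation of key-homogeneous buckets listed in strictly increasing key order
theorem pvBucket_insert {α : Type} (key : α → Int) (x : α) (R : List Int) (B : Int → List α)
    (hR : R.Pairwise (· < ·)) (hx : key x ∈ R)
    (hB : ∀ ℓ ∈ R, ∀ y ∈ B ℓ, key y = ℓ) :
    PySem.List.insertBy (fun a b => decide (key a < key b)) x (R.flatMap B) =
      R.flatMap (fun ℓ => B ℓ ++ if key x = ℓ then [x] else []) := by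
  induction R with
  | nil => simp at hx
  | cons ℓ0 R' ih =>
    rcases List.pairwise_cons.mp hR with ⟨hlt, hR'⟩
    simp only [List.flatMap_cons]
    by_cases he : key x = ℓ0
    · have h1 : ∀ y ∈ B ℓ0, (decide (key x < key y)) = false := by
        intro y hy
        have hk := hB ℓ0 (by simp) y hy
        simp [hk, he]
      have h2 : ∀ y ∈ R'.flatMap B, (decide (key x < key y)) = true := by
        intro y hy
        rcases List.mem_flatMap.mp hy with ⟨ℓ, hℓ, hyB⟩
        have hk := hB ℓ (by simp [hℓ]) y hyB
        have := hlt ℓ hℓ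
        simp [hk, he]
        omega
      rw [pvInsertBy_skip _ _ _ _ h1, pvInsertBy_front _ _ _ h2]
      have h3 : R'.flatMap (fun ℓ => B ℓ ++ if key x = ℓ then [x] else []) = R'.flatMap B := by
        apply pvFlatMap_congr_mem
        intro ℓ hℓ
        have hne : key x ≠ ℓ := by have := hlt ℓ hℓ; omega
        simp [hne]
      rw [h3]
      simp [he]
    · have hx' : key x ∈ R' := by
        rcases List.mem_cons.mp hx with h | h
        · exact absurd h he
        · exact h
      have h1 : ∀ y ∈ B ℓ0, (decide (key x < key y)) = false := by
        intro y hy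
        have hk := hB ℓ0 (by simp) y hy
        have := hlt _ hx'
        simp [hk]; omega
      rw [pvInsertBy_skip _ _ _ _ h1,
        ih hR' hx' (fun ℓ hℓ y hy => hB ℓ (by simp [hℓ]) y hy)]
      simp [he]

-- stable sort by an Int key = concatenation of the key-buckets in increasing key order
theorem pvSorted_buckets {α : Type} (xs : List α) (key : α → Int) (R : List Int)
    (hR : R.Pairwise (· < ·)) (hmem : ∀ x ∈ xs, key x ∈ R) :
    PySem.List.sorted xs key =
      R.flatMap (fun ℓ => xs.filter (fun x => decide (key x = ℓ))) := by
  induction xs using List.reverseRecOn with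
  | nil => simp [PySem.List.sorted_eq_foldl_insertBy]
  | append_singleton xs x ih =>
    have hx : key x ∈ R := hmem x (by simp)
    have hxs : ∀ y ∈ xs, key y ∈ R := fun y hy => hmem y (by simp [hy])
    rw [PySem.List.sorted_eq_foldl_insertBy, List.foldl_append, List.foldl_cons, List.foldl_nil,
      ← PySem.List.sorted_eq_foldl_insertBy, ih hxs,
      pvBucket_insert key x R _ hR hx
        (fun ℓ _ y hy => by
          have h2 := (List.mem_filter.mp hy).2
          exact of_decide_eq_true h2)]
    apply pvFlatMap_congr_mem
    intro ℓ _
    by_cases h : key x = ℓ <;> simp [List.filter_append, h]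

-- the enumerate-and-index inner pass over questions/answers is the filtered zip
theorem pvEnumZip (P : String → Prop) [DecidablePred P] :
    ∀ (qs : List String) (s : Nat) (as_ : List String),
      (∀ k, k < qs.length → P (qs.getD k "") → s + k < as_.length) →
      ((PySem.List.enumerate qs (s : Int)).filter (fun iq => decide (P iq.2))).map
          (fun iq => (iq.2, PySem.List.pyGetD as_ iq.1 "")) =
        (qs.zip (as_.drop s)).filter (fun p => decide (P p.1)) := by
  intro qs
  induction qs with
  | nil => intro s as_ _; simp [PySem.List.enumerate_nil]
  | cons q qs ih =>
    intro s as_ h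
    have hcast : (s : Int) + 1 = ((s + 1 : Nat) : Int) := by push_cast; ring
    have hrec : ∀ k, k < qs.length → P (qs.getD k "") → (s + 1) + k < as_.length := by
      intro k hk hPk
      have := h (k + 1) (by simpa using Nat.succ_lt_succ hk) (by simpa using hPk)
      omega
    rw [PySem.List.enumerate_cons, List.filter_cons]
    by_cases hP : P q
    · have hs : s < as_.length := by
        have := h 0 (by simp) (by simpa using hP)
        omega
      have hget : PySem.List.pyGetD as_ (s : Int) "" = as_[s] := by
        rw [PySem.List.pyGetD_natCast]
        exact List.getD_eq_getElem _ _ hs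
      rw [List.drop_eq_getElem_cons hs, List.zip_cons_cons, List.filter_cons]
      simp only [hP, decide_true, if_true, List.map_cons]
      rw [hcast, ih (s + 1) as_ hrec, hget]
    · simp only [hP, decide_false, Bool.false_eq_true, if_false]
      rw [hcast, ih (s + 1) as_ hrec]
      have hdrop1 : as_.drop (s + 1) = (as_.drop s).drop 1 := by
        rw [List.drop_drop]
      cases hd : as_.drop s with
      | nil =>
        have h1 : as_.drop (s + 1) = [] := by rw [hdrop1, hd]; rfl
        simp [h1]
      | cons a rest =>
        have h1 : as_.drop (s + 1) = rest := by rw [hdrop1, hd]; rfl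
        simp [hd, h1, List.zip_cons_cons, hP]

-- A in flat (bucket-per-length) form
theorem pvA_flat (qs as_ : List String) (mll : Int) :
    sort_question_answers_based_on_number_of_words qs as_ mll =
      ((PySem.List.pyRange 2 mll).flatMap (fun ℓ =>
          ((PySem.List.enumerate qs).filter
              (fun iq => decide (((((PySem.Str.split? iq.2 " ").getD []).length : Int)) = ℓ))).map
            (fun iq => PySem.List.pyGetD qs iq.1 "")),
       (PySem.List.pyRange 2 mll).flatMap (fun ℓ =>
          ((PySem.List.enumerate qs).filter
              (fun iq => decide (((((PySem.Str.split? iq.2 " ").getD []).length : Int)) = ℓ))).map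
            (fun iq => PySem.List.pyGetD as_ iq.1 ""))) := by
  unfold sort_question_answers_based_on_number_of_words
  have hinner : ∀ (ℓ : Int) (a1 a2 : List String),
      (PySem.List.enumerate qs).foldl
        (fun acc2 iq =>
          if ((((PySem.Str.split? iq.2 " ").getD []).length : Int) = ℓ) then
            (acc2.1 ++ [PySem.List.pyGetD qs iq.1 ""],
             acc2.2 ++ [PySem.List.pyGetD as_ iq.1 ""])
          else acc2) (a1, a2)
      = (a1 ++ ((PySem.List.enumerate qs).filter
              (fun iq => decide (((((PySem.Str.split? iq.2 " ").getD []).length : Int)) = ℓ))).map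
            (fun iq => PySem.List.pyGetD qs iq.1 ""),
         a2 ++ ((PySem.List.enumerate qs).filter
              (fun iq => decide (((((PySem.Str.split? iq.2 " ").getD []).length : Int)) = ℓ))).map
            (fun iq => PySem.List.pyGetD as_ iq.1 "")) := by
    intro ℓ a1 a2
    have hfun : (fun (acc2 : List String × List String) (iq : Int × String) =>
          if ((((PySem.Str.split? iq.2 " ").getD []).length : Int) = ℓ) then
            (acc2.1 ++ [PySem.List.pyGetD qs iq.1 ""],
             acc2.2 ++ [PySem.List.pyGetD as_ iq.1 ""])
          else acc2)
        = (fun s e =>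
            ((fun a (iq : Int × String) =>
                if ((((PySem.Str.split? iq.2 " ").getD []).length : Int) = ℓ) then
                  a ++ [PySem.List.pyGetD qs iq.1 ""] else a) s.1 e,
             (fun a (iq : Int × String) =>
                if ((((PySem.Str.split? iq.2 " ").getD []).length : Int) = ℓ) then
                  a ++ [PySem.List.pyGetD as_ iq.1 ""] else a) s.2 e)) := by
      funext s e
      by_cases hc : ((((PySem.Str.split? e.2 " ").getD []).length : Int) = ℓ) <;> simp [hc]
    rw [hfun,
      PySem.List.foldl_prod_mk
        (f := fun (a : List String) (iq : Int × String) =>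
          if ((((PySem.Str.split? iq.2 " ").getD []).length : Int) = ℓ) then
            a ++ [PySem.List.pyGetD qs iq.1 ""] else a)
        (g := fun (a : List String) (iq : Int × String) =>
          if ((((PySem.Str.split? iq.2 " ").getD []).length : Int) = ℓ) then
            a ++ [PySem.List.pyGetD as_ iq.1 ""] else a),
      PySem.List.foldl_append_ite, PySem.List.foldl_append_ite]
  have houter := PySem.List.foldl_congr_mem
    (l := PySem.List.pyRange 2 mll)
    (init := (([] : List String), ([] : List String)))
    (f := fun (acc : List String × List String) (ℓ : Int) =>
      (PySem.List.enumerate qs).foldl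
        (fun acc2 iq =>
          if ((((PySem.Str.split? iq.2 " ").getD []).length : Int) = ℓ) then
            (acc2.1 ++ [PySem.List.pyGetD qs iq.1 ""],
             acc2.2 ++ [PySem.List.pyGetD as_ iq.1 ""])
          else acc2) acc)
    (g := fun (acc : List String × List String) (ℓ : Int) =>
      (acc.1 ++ ((PySem.List.enumerate qs).filter
              (fun iq => decide (((((PySem.Str.split? iq.2 " ").getD []).length : Int)) = ℓ))).map
            (fun iq => PySem.List.pyGetD qs iq.1 ""),
       acc.2 ++ ((PySem.List.enumerate qs).filter
              (fun iq => decide (((((PySem.Str.split? iq.2 " ").getD []).length : Int)) = ℓ))).map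
            (fun iq => PySem.List.pyGetD as_ iq.1 "")))
    (by
      intro acc ℓ _
      obtain ⟨a1, a2⟩ := acc
      exact hinner ℓ a1 a2)
  rw [houter,
    PySem.List.foldl_prod_mk
      (f := fun (a : List String) (ℓ : Int) => a ++ ((PySem.List.enumerate qs).filter
              (fun iq => decide (((((PySem.Str.split? iq.2 " ").getD []).length : Int)) = ℓ))).map
            (fun iq => PySem.List.pyGetD qs iq.1 ""))
      (g := fun (a : List String) (ℓ : Int) => a ++ ((PySem.List.enumerate qs).filter
              (fun iq => decide (((((PySem.Str.split? iq.2 " ").getD []).length : Int)) = ℓ))).map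
            (fun iq => PySem.List.pyGetD as_ iq.1 "")),
    PySem.List.foldl_append_eq_flatMap, PySem.List.foldl_append_eq_flatMap]
  simp

-- ===== VERDICT (by name: the statement is the Claim_ definition above) =====
theorem sort_question_answers_based_on_number_of_words_spec : Claim_equal_sort_question_answers_based_on_number_of_words := by
  intro qs as_ mll _hdom hpre
  unfold Spec_sort_question_answers_based_on_number_of_words
  rw [pvA_flat]
  simp only [sort_question_answers_based_on_number_of_words_alt]
  rw [pvSorted_buckets _ _ (PySem.List.pyRange 2 mll) (pvPyRange_pairwise 2 mll)
      (by
        intro p hp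
        have h2 := (List.mem_filter.mp hp).2
        exact PySem.List.mem_pyRange_one.mpr (of_decide_eq_true h2))]
  rw [Prod.mk.injEq]
  have hC : ∀ ℓ : Int, 2 ≤ ℓ → ℓ < mll →
      ((qs.zip as_).filter
          (fun p => decide (2 ≤ ((((PySem.Str.split? p.1 " ").getD []).length : Int)) ∧ ((((PySem.Str.split? p.1 " ").getD []).length : Int)) < mll))).filter
          (fun p => decide (((((PySem.Str.split? p.1 " ").getD []).length : Int)) = ℓ))
        = (qs.zip as_).filter (fun p => decide (((((PySem.Str.split? p.1 " ").getD []).length : Int)) = ℓ)) := by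
    intro ℓ h2ℓ hℓm
    rw [List.filter_comm, List.filter_filter]
    apply List.filter_congr
    intro p _
    by_cases hk : ((((PySem.Str.split? p.1 " ").getD []).length : Int)) = ℓ
    · have hin : (2 : Int) ≤ ((((PySem.Str.split? p.1 " ").getD []).length : Int)) ∧
          ((((PySem.Str.split? p.1 " ").getD []).length : Int)) < mll := by
        rw [hk]; exact ⟨h2ℓ, hℓm⟩
      simp [hk]
      exact ⟨h2ℓ, hℓm⟩
    · simp [hk]
  have hhz : ∀ ℓ : Int, 2 ≤ ℓ → ℓ < mll →
      ((PySem.List.enumerate qs).filter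
          (fun iq => decide (((((PySem.Str.split? iq.2 " ").getD []).length : Int)) = ℓ))).map
          (fun iq => (iq.2, PySem.List.pyGetD as_ iq.1 "")) =
        (qs.zip as_).filter (fun p => decide (((((PySem.Str.split? p.1 " ").getD []).length : Int)) = ℓ)) := by
    intro ℓ h2ℓ hℓm
    have hh : ∀ k, k < qs.length →
        ((((PySem.Str.split? (qs.getD k "") " ").getD []).length : Int)) = ℓ →
        0 + k < as_.length := by
      intro k hk hPk
      have := hpre k hk (by unfold pvWcI; omega)
      omega
    have hz := pvEnumZip (fun q => ((((PySem.Str.split? q " ").getD []).length : Int)) = ℓ) qs 0 as_ hh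
    simp only [Nat.cast_zero, List.drop_zero] at hz
    exact hz
  refine ⟨?_, ?_⟩
  · simp only [List.map_flatMap]
    apply pvFlatMap_congr_mem
    intro ℓ hℓ
    obtain ⟨h2ℓ, hℓm⟩ := PySem.List.mem_pyRange_one.mp hℓ
    have hEq : ((PySem.List.enumerate qs).filter
          (fun iq => decide (((((PySem.Str.split? iq.2 " ").getD []).length : Int)) = ℓ))).map
          (fun iq => PySem.List.pyGetD qs iq.1 "")
        = (((PySem.List.enumerate qs).filter
          (fun iq => decide (((((PySem.Str.split? iq.2 " ").getD []).length : Int)) = ℓ))).map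
          (fun iq => (iq.2, PySem.List.pyGetD as_ iq.1 ""))).map Prod.fst := by
      rw [List.map_map]
      apply List.map_congr_left
      intro iq hiq
      have hmemE := List.mem_of_mem_filter hiq
      rcases (PySem.List.mem_enumerate_iff _ _ _).mp hmemE with ⟨k, hk, rfl⟩
      simp only [Function.comp_apply]
      rw [show ((0 : Int) + (k : Int)) = ((k : Nat) : Int) by omega]
      rw [PySem.List.pyGetD_natCast]
      exact List.getD_eq_getElem _ _ hk
    rw [hEq, hhz ℓ h2ℓ hℓm, hC ℓ h2ℓ hℓm]
  · simp only [List.map_flatMap]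
    apply pvFlatMap_congr_mem
    intro ℓ hℓ
    obtain ⟨h2ℓ, hℓm⟩ := PySem.List.mem_pyRange_one.mp hℓ
    have hEq : ((PySem.List.enumerate qs).filter
          (fun iq => decide (((((PySem.Str.split? iq.2 " ").getD []).length : Int)) = ℓ))).map
          (fun iq => PySem.List.pyGetD as_ iq.1 "")
        = (((PySem.List.enumerate qs).filter
          (fun iq => decide (((((PySem.Str.split? iq.2 " ").getD []).length : Int)) = ℓ))).map
          (fun iq => (iq.2, PySem.List.pyGetD as_ iq.1 ""))).map Prod.snd := by
      rw [List.map_map]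
      rfl
    rw [hEq, hhz ℓ h2ℓ hℓm, hC ℓ h2ℓ hℓm]
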